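-- pv_equiv track=rewrite | github.com/papilo-cloud/Python_Data_Structures- | Recursion/add_until_100.py | add_until_100_2
-- ===== SOURCE A (Python) =====
-- def add_until_100_2(array, index = 0):
--     if len(array) == index:
--         return 0
--
--     sum_of_array = add_until_100_2(array, index + 1)
--
--     if array[index] + sum_of_array > 100:
--         return sum_of_array
--     else:
--         return array[index] + sum_of_array
-- ===== SOURCE B (Python) =====
-- def add_until_100_2(array, index=0):
--     total = 0
--     for i in reversed(range(index, len(array))):
--         x = array[i]
--         if x + total <= 100:
--             total += x
--     return total
-- ===== Notes on version B (the rewrite author's own statement) =====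
-- stated objective: simpler
-- what changed: Replaces the O(n)-deep recursion (which builds the suffix sum bottom-up) with a single iterative loop over the indices from len(array)-1 down to index, keeping a running total and skipping elements that push it past 100.
-- outside the precondition, e.g. on add_until_100_2([1, 2, 3], 5): A raises RecursionError, B returns 0; on add_until_100_2([10, 20], -3): A raises IndexError, B raises IndexError
import Mathlib
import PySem

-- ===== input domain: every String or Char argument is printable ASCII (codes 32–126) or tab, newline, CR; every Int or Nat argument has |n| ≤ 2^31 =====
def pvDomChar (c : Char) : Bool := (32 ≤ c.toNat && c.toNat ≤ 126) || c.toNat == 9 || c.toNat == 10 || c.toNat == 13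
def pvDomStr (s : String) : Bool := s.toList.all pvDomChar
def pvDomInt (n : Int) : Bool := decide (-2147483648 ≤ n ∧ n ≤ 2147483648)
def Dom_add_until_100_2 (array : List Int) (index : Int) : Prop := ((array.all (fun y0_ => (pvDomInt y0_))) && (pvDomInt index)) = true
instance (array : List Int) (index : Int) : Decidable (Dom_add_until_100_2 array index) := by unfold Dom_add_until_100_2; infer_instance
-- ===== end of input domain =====

-- B replaces A's suffix recursion by a single iterative reverse index loop; objective: simpler.


-- ===== PORT A =====
-- A's recursion on `index` counting up to len(array); fuel only makes the same recursion total.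
def addUntilGo (array : List Int) (index : Int) : Nat → Int
  | 0 => 0  -- fuel exhausted: Python's RecursionError when index > len (unreachable under Pre_)
  | fuel+1 =>
    if (array.length : Int) = index then 0
    else
      let sum_of_array := addUntilGo array (index + 1) fuel
      match PySem.List.pyGet? array index with
      | none => 0  -- IndexError when index < -len (unreachable under Pre_)
      | some v => if v + sum_of_array > 100 then sum_of_array else v + sum_of_array

def add_until_100_2 (array : List Int) (index : Int) : Int :=
  addUntilGo array index ((array.length : Int) + 1 - index).toNat

-- ===== PORT B =====
def add_until_100_2_alt (array : List Int) (index : Int) : Int :=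
  ((PySem.List.pyRange index (array.length : Int) 1).reverse).foldl
    (fun total i =>
      match PySem.List.pyGet? array i with
      | some x => if x + total ≤ 100 then total + x else total
      | none => total)  -- IndexError in Python B when i < -len (unreachable under Pre_)
    0

-- ===== PRECONDITION & SPEC =====
-- Pre_ excludes only the inputs where A raises: index > len(array) (unbounded recursion,
-- RecursionError) and index < -len(array) (IndexError at the end of the recursion).
def Pre_add_until_100_2 (array : List Int) (index : Int) : Prop :=
  -(array.length : Int) ≤ index ∧ index ≤ (array.length : Int)
instance (array : List Int) (index : Int) : Decidable (Pre_add_until_100_2 array index) := by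
  unfold Pre_add_until_100_2; infer_instance
def pvWitness_add_until_100_2 : List Int × Int := ([60, 50, 30], 0)

def Spec_add_until_100_2 (array : List Int) (index : Int) (out : Int) : Prop := out = add_until_100_2_alt array index
instance (array : List Int) (index : Int) (out : Int) : Decidable (Spec_add_until_100_2 array index out) := by unfold Spec_add_until_100_2; infer_instance

-- ===== CLAIM (what is proved, stated in full; the proofs are below) =====
def Claim_equal_add_until_100_2 : Prop := ∀ (array : List Int) (index : Int), Dom_add_until_100_2 array index → Pre_add_until_100_2 array index → Spec_add_until_100_2 array index (add_until_100_2 array index)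

-- ===== LEMMAS AND PROOFS =====

-- The per-index step both programs perform, folded from the right over range(index, len).
def addStep (array : List Int) (i s : Int) : Int :=
  match PySem.List.pyGet? array i with
  | some x => if x + s > 100 then s else x + s
  | none => s

theorem addUntilGo_eq_foldr (array : List Int) (fuel : Nat) (index : Int)
    (hlo : -(array.length : Int) ≤ index) (hhi : index ≤ (array.length : Int))
    (hf : ((array.length : Int) - index).toNat < fuel) :
    addUntilGo array index fuel
      = (PySem.List.pyRange index (array.length : Int) 1).foldr (addStep array) 0 := by
  induction fuel generalizing index with
  | zero => omega
  | succ fuel ih =>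
    by_cases h : (array.length : Int) = index
    · simp [addUntilGo, ← h]
    · have hlt : index < (array.length : Int) := lt_of_le_of_ne hhi (fun e => h e.symm)
      obtain ⟨x, hx⟩ : ∃ x, PySem.List.pyGet? array index = some x := by
        cases hg : PySem.List.pyGet? array index with
        | some x => exact ⟨x, rfl⟩
        | none =>
          rw [PySem.List.pyGet?_eq_none_iff] at hg
          exact absurd (by simp [PySem.Raise.InRange]; omega) hg
      rw [PySem.List.pyRange_one_cons hlt, List.foldr_cons,
        addUntilGo, if_neg h, ih (index + 1) (by omega) (by omega) (by omega)]
      simp only [addStep, hx]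

theorem foldl_reverse_eq_foldr (array : List Int) (L : List Int) :
    (L.reverse).foldl
      (fun total i =>
        match PySem.List.pyGet? array i with
        | some x => if x + total ≤ 100 then total + x else total
        | none => total) 0
      = L.foldr (addStep array) 0 := by
  rw [List.foldl_reverse]
  induction L with
  | nil => rfl
  | cons i L ih =>
    simp only [List.foldr_cons, ih, addStep]
    cases PySem.List.pyGet? array i with
    | none => rfl
    | some x =>
      generalize L.foldr (addStep array) 0 = s
      by_cases h : x + s ≤ 100
      · simp only [if_pos h, if_neg (by omega : ¬ x + s > 100)]; ring
      · simp only [if_neg h, if_pos (by omega : x + s > 100)]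

-- ===== VERDICT (by name: the statement is the Claim_ definition above) =====
theorem add_until_100_2_spec : Claim_equal_add_until_100_2 := by
  intro array index _ hpre
  obtain ⟨hlo, hhi⟩ := hpre
  show add_until_100_2 array index = add_until_100_2_alt array index
  rw [add_until_100_2,
    addUntilGo_eq_foldr array (((array.length : Int) + 1 - index).toNat) index hlo hhi (by omega),
    add_until_100_2_alt, foldl_reverse_eq_foldr]
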